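-- pv_equiv track=rewrite | github.com/irajmoradi/Operations-Research-5C-Dining-Hall-Model | ORProject.py | arrangePoLocsinTable
-- ===== SOURCE A (Python) =====
-- def arrangePoLocsinTable(locs, days):
--     output = 'param postMealLocation := \n'
--     mealV = ''
--     dayV = ''
--     for i in range(28):
--         if i < 7:
--             mealV = 'Breakfast'
--         elif i < 14 and i >= 7:
--             mealV = 'Brunch'
--         elif i >= 14 and i < 21:
--             mealV = "Lunch"
--         else:
--             mealV = "Dinner"
--         dayV = days[(i % 7)]
--
--         if ((dayV == 'Saturday' or dayV == "Sunday") and (mealV == 'Breakfast' or mealV == 'Lunch') or (dayV != 'Saturday' and dayV != 'Sunday' and mealV == 'Brunch')):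
--             output += "["+dayV+", "+mealV+", *] Pomona 0 Scripps 0 CMC 0 Pitzer 0 Mudd 0 \n"
--         else:
--             output += "["+dayV+", "+mealV+", *]"
--             for j in range(len(locs)):
--                 if dayV[0:3] in locs[j] and mealV[0:3] in locs[j]:
--                     if dayV == 'Sunday' and mealV == 'Dinner':
--                         if 'Pomona' in locs[j]:
--                             output += " Pomona 1 Scripps 0 CMC 0 Pitzer 0 Mudd 0;"
--                         elif 'Scipps' in locs[j]:
--                             output += " Pomona 0 Scripps 1 CMC 0 Pitzer 0 Mudd 0;"
--                         elif 'CMC' in locs[j]: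
--                             output += " Pomona 0 Scripps 0 CMC 1 Pitzer 0 Mudd 0;"
--                         elif 'Pitzer' in locs[j]:
--                             output += " Pomona 0 Scripps 0 CMC 0 Pitzer 1 Mudd 0;"
--                         else:
--                             output += " Pomona 0 Scripps 0 CMC 0 Pitzer 0 Mudd 1;"
--                     elif 'Pomona' in locs[j]:
--                         output += " Pomona 1 Scripps 0 CMC 0 Pitzer 0 Mudd 0 \n"
--                     elif 'Scipps' in locs[j]:
--                         output += " Pomona 0 Scripps 1 CMC 0 Pitzer 0 Mudd 0 \n"
--                     elif 'CMC' in locs[j]: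
--                         output += " Pomona 0 Scripps 0 CMC 1 Pitzer 0 Mudd 0 \n"
--                     elif 'Pitzer' in locs[j]:
--                         output += " Pomona 0 Scripps 0 CMC 0 Pitzer 1 Mudd 0 \n"
--                     else:
--                         output += " Pomona 0 Scripps 0 CMC 0 Pitzer 0 Mudd 1 \n"
--     return output
-- ===== SOURCE B (Python) =====
-- def _row(loc):
--     names = ['Pomona', 'Scipps', 'CMC', 'Pitzer']
--     cols = ['Pomona', 'Scripps', 'CMC', 'Pitzer', 'Mudd']
--     hit = 4
--     for t in range(4):
--         if names[t] in loc:
--             hit = t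
--             break
--     out = ''
--     for c in range(5):
--         out += ' ' + cols[c] + ' ' + ('1' if c == hit else '0')
--     return out
--
--
-- def arrangePoLocsinTable(locs, days):
--     meals = ['Breakfast', 'Brunch', 'Lunch', 'Dinner']
--     dayP = list(dict.fromkeys(days[k][:3] for k in range(7)))
--     mealP = [m[:3] for m in meals]
--     buckets = {(p, q): [] for p in dayP for q in mealP}
--     for loc in locs:
--         for key in [(p, q) for p in dayP if p in loc for q in mealP if q in loc]:
--             buckets[key].append(loc)
--     output = 'param postMealLocation := \n'
--     for m in meals:
--         for k in range(7):
--             d = days[k]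
--             weekend = d == 'Saturday' or d == 'Sunday'
--             if (weekend and (m == 'Breakfast' or m == 'Lunch')) or (not weekend and m == 'Brunch'):
--                 output += '[' + d + ', ' + m + ', *] Pomona 0 Scripps 0 CMC 0 Pitzer 0 Mudd 0 \n'
--             else:
--                 end = ';' if d == 'Sunday' and m == 'Dinner' else ' \n'
--                 output += '[' + d + ', ' + m + ', *]'
--                 for loc in buckets[(d[:3], m[:3])]:
--                     output += _row(loc) + end
--     return output
-- ===== Notes on version B (the rewrite author's own statement) =====
-- stated objective: faster
-- what changed: B precomputes a dict index mapping each (day[:3], meal[:3]) prefix pair to the ordered list of matching locs in one pass (testing each loc against the 7 day prefixes and 4 meal prefixes once), replaces A's i%7 index arithmetic with nested meal/day loops, replaces the per-cell inner rescan of locs with a bucket lookup, and formats each row with a table-driven column loop instead of A's five-literal elif chain.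
import Mathlib
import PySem

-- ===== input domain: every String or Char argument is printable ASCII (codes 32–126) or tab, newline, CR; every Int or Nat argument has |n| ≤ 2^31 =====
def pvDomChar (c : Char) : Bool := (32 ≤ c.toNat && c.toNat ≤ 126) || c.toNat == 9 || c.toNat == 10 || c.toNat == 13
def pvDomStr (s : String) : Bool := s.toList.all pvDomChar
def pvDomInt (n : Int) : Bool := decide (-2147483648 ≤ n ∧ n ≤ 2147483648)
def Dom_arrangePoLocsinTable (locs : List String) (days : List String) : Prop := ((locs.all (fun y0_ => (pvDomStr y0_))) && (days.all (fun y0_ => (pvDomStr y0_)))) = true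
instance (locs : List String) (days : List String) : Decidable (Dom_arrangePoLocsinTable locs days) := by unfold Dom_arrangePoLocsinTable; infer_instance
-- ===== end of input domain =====

-- B replaces A's per-cell rescan of locs with a (day-prefix, meal-prefix) bucket index built in one
-- pass over locs, and a table-driven row formatter; objective: faster (constant-factor, measured).


-- ===== PORT A =====
def arrangePoLocsinTable (locs : List String) (days : List String) : String :=
  (PySem.List.pyRange 0 28 1).foldl (fun output i =>
    let mealV : String :=
      if i < 7 then "Breakfast"
      else if i < 14 ∧ 7 ≤ i then "Brunch"
      else if 14 ≤ i ∧ i < 21 then "Lunch"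
      else "Dinner"
    let dayV := PySem.List.pyGetD days (PySem.Int.mod i 7) ""
    if ((dayV = "Saturday" ∨ dayV = "Sunday") ∧ (mealV = "Breakfast" ∨ mealV = "Lunch")) ∨
       (dayV ≠ "Saturday" ∧ dayV ≠ "Sunday" ∧ mealV = "Brunch") then
      output ++ "[" ++ dayV ++ ", " ++ mealV ++ ", *] Pomona 0 Scripps 0 CMC 0 Pitzer 0 Mudd 0 \n"
    else
      (PySem.List.pyRange 0 (PySem.List.len locs) 1).foldl (fun output j =>
        let loc := PySem.List.pyGetD locs j ""
        if PySem.Str.isIn (PySem.Str.slice dayV (some 0) (some 3)) loc = true ∧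
           PySem.Str.isIn (PySem.Str.slice mealV (some 0) (some 3)) loc = true then
          if dayV = "Sunday" ∧ mealV = "Dinner" then
            if PySem.Str.isIn "Pomona" loc = true then output ++ " Pomona 1 Scripps 0 CMC 0 Pitzer 0 Mudd 0;"
            else if PySem.Str.isIn "Scipps" loc = true then output ++ " Pomona 0 Scripps 1 CMC 0 Pitzer 0 Mudd 0;"
            else if PySem.Str.isIn "CMC" loc = true then output ++ " Pomona 0 Scripps 0 CMC 1 Pitzer 0 Mudd 0;"
            else if PySem.Str.isIn "Pitzer" loc = true then output ++ " Pomona 0 Scripps 0 CMC 0 Pitzer 1 Mudd 0;"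
            else output ++ " Pomona 0 Scripps 0 CMC 0 Pitzer 0 Mudd 1;"
          else if PySem.Str.isIn "Pomona" loc = true then output ++ " Pomona 1 Scripps 0 CMC 0 Pitzer 0 Mudd 0 \n"
          else if PySem.Str.isIn "Scipps" loc = true then output ++ " Pomona 0 Scripps 1 CMC 0 Pitzer 0 Mudd 0 \n"
          else if PySem.Str.isIn "CMC" loc = true then output ++ " Pomona 0 Scripps 0 CMC 1 Pitzer 0 Mudd 0 \n"
          else if PySem.Str.isIn "Pitzer" loc = true then output ++ " Pomona 0 Scripps 0 CMC 0 Pitzer 1 Mudd 0 \n"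
          else output ++ " Pomona 0 Scripps 0 CMC 0 Pitzer 0 Mudd 1 \n"
        else output)
        (output ++ "[" ++ dayV ++ ", " ++ mealV ++ ", *]"))
    "param postMealLocation := \n"

-- ===== PORT B =====
-- _row: first matching name by a break loop, then a 5-column table loop
def findHitAlt : List (Nat × String) → String → Nat
  | [], _ => 4
  | (t, n) :: rest, loc => if PySem.Str.isIn n loc = true then t else findHitAlt rest loc

def rowAlt (loc : String) : String :=
  let cols : List String := ["Pomona", "Scripps", "CMC", "Pitzer", "Mudd"]
  let hit := findHitAlt [(0, "Pomona"), (1, "Scipps"), (2, "CMC"), (3, "Pitzer")] loc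
  (PySem.List.pyRange 0 5 1).foldl (fun out c =>
    out ++ " " ++ PySem.List.pyGetD cols c "" ++ " " ++ (if c = (hit : Int) then "1" else "0")) ""

def arrangePoLocsinTable_alt (locs : List String) (days : List String) : String :=
  let meals : List String := ["Breakfast", "Brunch", "Lunch", "Dinner"]
  let dayP : List String := PySem.List.dedup ((PySem.List.pyRange 0 7 1).map
    (fun k => PySem.Str.slice (PySem.List.pyGetD days k "") none (some 3)))
  let mealP : List String := meals.map (fun m => PySem.Str.slice m none (some 3))
  let buckets0 : PySem.Dict (String × String) (List String) :=
    (dayP.flatMap (fun p => mealP.map (fun q => (p, q)))).foldl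
      (fun d key => d.insert key []) PySem.Dict.empty
  let buckets := locs.foldl (fun d loc =>
      ((dayP.filter (fun p => PySem.Str.isIn p loc)).flatMap (fun p =>
        (mealP.filter (fun q => PySem.Str.isIn q loc)).map (fun q => (p, q)))).foldl
        (fun d key => d.modify key [] (fun v => v ++ [loc])) d) buckets0
  meals.foldl (fun output m =>
    (PySem.List.pyRange 0 7 1).foldl (fun output k =>
      let d := PySem.List.pyGetD days k ""
      if ((d = "Saturday" ∨ d = "Sunday") ∧ (m = "Breakfast" ∨ m = "Lunch")) ∨
         (¬ (d = "Saturday" ∨ d = "Sunday") ∧ m = "Brunch") then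
        output ++ "[" ++ d ++ ", " ++ m ++ ", *] Pomona 0 Scripps 0 CMC 0 Pitzer 0 Mudd 0 \n"
      else
        let endS : String := if d = "Sunday" ∧ m = "Dinner" then ";" else " \n"
        (buckets.getD (PySem.Str.slice d none (some 3), PySem.Str.slice m none (some 3)) []).foldl
          (fun output loc => output ++ (rowAlt loc ++ endS))
          (output ++ "[" ++ d ++ ", " ++ m ++ ", *]")) output)
    "param postMealLocation := \n"

-- ===== PRECONDITION & SPEC =====
-- Pre_ excludes exactly the inputs where Python A raises IndexError: days[i % 7] needs 7 entries.
def Pre_arrangePoLocsinTable (locs : List String) (days : List String) : Prop := 7 ≤ days.length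
instance (locs : List String) (days : List String) : Decidable (Pre_arrangePoLocsinTable locs days) := by unfold Pre_arrangePoLocsinTable; infer_instance
def pvWitness_arrangePoLocsinTable : List String × List String :=
  (["MonBre Pomona"], ["Monday", "Tuesday", "Wednesday", "Thursday", "Friday", "Saturday", "Sunday"])
def Spec_arrangePoLocsinTable (locs : List String) (days : List String) (out : String) : Prop := out = arrangePoLocsinTable_alt locs days
instance (locs : List String) (days : List String) (out : String) : Decidable (Spec_arrangePoLocsinTable locs days out) := by unfold Spec_arrangePoLocsinTable; infer_instance

-- ===== CLAIM (what is proved, stated in full; the proofs are below) =====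
def Claim_equal_arrangePoLocsinTable : Prop := ∀ (locs : List String) (days : List String), Dom_arrangePoLocsinTable locs days → Pre_arrangePoLocsinTable locs days → Spec_arrangePoLocsinTable locs days (arrangePoLocsinTable locs days)

-- ===== LEMMAS AND PROOFS =====

def strCat (l : List String) : String := l.foldl (· ++ ·) ""

theorem foldl_strAppend (l : List String) (s : String) : l.foldl (· ++ ·) s = s ++ strCat l := by
  induction l generalizing s with
  | nil => simp [strCat, String.append_empty]
  | cons a t ih =>
      have h1 : strCat (a :: t) = a ++ strCat t := by
        show List.foldl (· ++ ·) ("" ++ a) t = _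
        rw [ih ("" ++ a), String.empty_append]
      rw [List.foldl_cons, ih (s ++ a), h1, String.append_assoc]

theorem strCat_cons (a : String) (t : List String) : strCat (a :: t) = a ++ strCat t := by
  show List.foldl (· ++ ·) ("" ++ a) t = _
  rw [foldl_strAppend, String.empty_append]

theorem foldl_strAppend_map {α : Type} (l : List α) (f : α → String) (s : String) :
    l.foldl (fun o x => o ++ f x) s = s ++ strCat (l.map f) := by
  induction l generalizing s with
  | nil => simp [strCat, String.append_empty]
  | cons a t ih => rw [List.foldl_cons, ih, List.map_cons, strCat_cons, String.append_assoc]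

theorem foldl_strAppend_if {α : Type} (l : List α) (p : α → Prop) [DecidablePred p] (f : α → String) (s : String) :
    l.foldl (fun o x => if p x then o ++ f x else o) s = s ++ strCat ((l.filter (fun x => decide (p x))).map f) := by
  induction l generalizing s with
  | nil => simp [strCat, String.append_empty]
  | cons a t ih =>
      by_cases h : p a
      · simp only [List.foldl_cons, ih, List.filter_cons, h, decide_true, if_true]
        rw [List.map_cons, strCat_cons, ← String.append_assoc]
      · simp [h, ih]


theorem foldl_flatMap {α β γ : Type} (l : List α) (f : α → List β) (g : γ → β → γ) (s : γ) :
    (l.flatMap f).foldl g s = l.foldl (fun s x => (f x).foldl g s) s := by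
  induction l generalizing s with
  | nil => rfl
  | cons a t ih => simp [List.flatMap_cons, List.foldl_append, ih]

theorem count_matched (dayP mealP : List String) (loc p q : String)
    (hpn : dayP.Nodup) (hqn : mealP.Nodup) (hp : p ∈ dayP) (hq : q ∈ mealP) :
    ((dayP.filter (fun r => PySem.Str.isIn r loc)).flatMap (fun r =>
      (mealP.filter (fun w => PySem.Str.isIn w loc)).map (fun w => (r, w)))).count (p, q)
    = if PySem.Str.isIn p loc = true ∧ PySem.Str.isIn q loc = true then 1 else 0 := by
  have hfst : ∀ (r : String) (x : String × String),
      x ∈ (mealP.filter (fun w => PySem.Str.isIn w loc)).map (fun w => (r, w)) → x.1 = r := by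
    intro r x hx
    rcases List.mem_map.mp hx with ⟨w, _, hw⟩
    rw [← hw]
  have hinner : ∀ r : String,
      ((mealP.filter (fun w => PySem.Str.isIn w loc)).map (fun w => (r, w))).count (p, q)
      = if r = p ∧ PySem.Str.isIn q loc = true then 1 else 0 := by
    intro r
    by_cases hr : r = p
    · subst hr
      rw [List.count_map_of_injective _ _ (fun a b h => by simpa using h)]
      by_cases hql : PySem.Str.isIn q loc = true
      · rw [List.count_eq_one_of_mem (hqn.filter _) (List.mem_filter.mpr ⟨hq, by simpa using hql⟩), if_pos ⟨rfl, hql⟩]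
      · rw [List.count_eq_zero.mpr (fun hmem => hql (by simpa using (List.mem_filter.mp hmem).2)), if_neg (fun hc => hql hc.2)]
    · rw [List.count_eq_zero.mpr (fun hmem => hr (hfst r (p, q) hmem).symm), if_neg (fun hc => hr hc.1)]
  induction dayP with
  | nil => cases hp
  | cons a t ih =>
      rcases List.nodup_cons.mp hpn with ⟨hna, hnt⟩
      by_cases hal : PySem.Str.isIn a loc = true
      · rw [List.filter_cons_of_pos (by simpa using hal), List.flatMap_cons, List.count_append, hinner a]
        rcases List.mem_cons.mp hp with rfl | hpt
        · rw [List.count_eq_zero.mpr]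
          · by_cases hql : PySem.Str.isIn q loc = true
            · rw [if_pos ⟨rfl, hql⟩, if_pos ⟨hal, hql⟩]
            · rw [if_neg (fun hc => hql hc.2), if_neg (fun hc => hql hc.2)]
          · intro hmem
            rcases List.mem_flatMap.mp hmem with ⟨r, hrmem, hrm⟩
            have hrp : r = p := (hfst r (p, q) hrm).symm
            exact hna (by rw [← hrp]; exact (List.mem_filter.mp hrmem).1)
        · have hap : a ≠ p := fun h => hna (h ▸ hpt)
          rw [if_neg (fun hc => hap hc.1), ih hnt hpt]
          simp
      · rw [List.filter_cons_of_neg (by simpa using hal)]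
        rcases List.mem_cons.mp hp with rfl | hpt
        · rw [if_neg (fun hc => hal hc.1), List.count_eq_zero.mpr]
          intro hmem
          rcases List.mem_flatMap.mp hmem with ⟨r, hrmem, hrm⟩
          have hrp : r = p := (hfst r (p, q) hrm).symm
          exact hna (by rw [← hrp]; exact (List.mem_filter.mp hrmem).1)
        · exact ih hnt hpt

theorem getD_modify_append_count {κ ν : Type} [BEq κ] [LawfulBEq κ] [DecidableEq κ]
    (ks : List κ) (d : PySem.Dict κ (List ν)) (x : ν) (c : κ) :
    (ks.foldl (fun d k => d.modify k [] (fun v => v ++ [x])) d).getD c []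
      = d.getD c [] ++ List.replicate (ks.count c) x := by
  induction ks generalizing d with
  | nil => simp
  | cons k t ih =>
      rw [List.foldl_cons, ih, PySem.Dict.getD_modify]
      by_cases hk : c = k
      · subst hk
        rw [if_pos rfl, List.count_cons_self, List.replicate_succ, List.append_assoc]
        rfl
      · rw [if_neg hk]
        have hk2 : ¬ k = c := fun h => hk h.symm
        simp [hk2]

theorem getD_foldl_insert_nil {κ ν : Type} [BEq κ] [LawfulBEq κ] [DecidableEq κ]
    (ks : List κ) (d : PySem.Dict κ (List ν)) (h : ∀ c, d.getD c [] = []) (c : κ) :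
    (ks.foldl (fun d k => d.insert k []) d).getD c [] = [] := by
  induction ks generalizing d with
  | nil => exact h c
  | cons k t ih =>
      rw [List.foldl_cons]
      exact ih _ (fun c' => by rw [PySem.Dict.getD_insert]; split <;> simp [h])

theorem buckets_getD (dayP mealP : List String) (locs : List String)
    (d : PySem.Dict (String × String) (List String)) (p q : String)
    (hpn : dayP.Nodup) (hqn : mealP.Nodup) (hp : p ∈ dayP) (hq : q ∈ mealP) :
    (locs.foldl (fun d loc =>
        ((dayP.filter (fun r => PySem.Str.isIn r loc)).flatMap (fun r =>
          (mealP.filter (fun w => PySem.Str.isIn w loc)).map (fun w => (r, w)))).foldl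
          (fun d key => d.modify key [] (fun v => v ++ [loc])) d) d).getD (p, q) []
      = d.getD (p, q) [] ++ locs.filter (fun l => PySem.Str.isIn p l && PySem.Str.isIn q l) := by
  induction locs generalizing d with
  | nil => simp
  | cons loc t ih =>
      rw [List.foldl_cons, ih, getD_modify_append_count]
      rw [count_matched dayP mealP loc p q hpn hqn hp hq, List.filter_cons]
      by_cases hc : PySem.Str.isIn p loc = true ∧ PySem.Str.isIn q loc = true
      · have hb : (PySem.Str.isIn p loc && PySem.Str.isIn q loc) = true := by rw [hc.1, hc.2]; rfl
        rw [if_pos hc]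
        simp only [hb, if_true, List.replicate_one, List.append_assoc, List.singleton_append]
      · have hb : (PySem.Str.isIn p loc && PySem.Str.isIn q loc) = false := by
          rcases Decidable.not_and_iff_or_not.mp hc with h | h <;>
            simp only [Bool.and_eq_false_iff] <;> [exact Or.inl (Bool.not_eq_true _ ▸ h); exact Or.inr (Bool.not_eq_true _ ▸ h)]
        rw [if_neg hc]
        simp only [hb, Bool.false_eq_true, if_false, List.replicate_zero, List.append_nil]

-- proof-side decomposition of the two ports

def mealChainA (i : Int) : String :=
  if i < 7 then "Breakfast"
  else if i < 14 ∧ 7 ≤ i then "Brunch"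
  else if 14 ≤ i ∧ i < 21 then "Lunch"
  else "Dinner"

def innerA (d3 m3 : String) (sd : Prop) [Decidable sd] (output : String) (loc : String) : String :=
  if PySem.Str.isIn d3 loc = true ∧ PySem.Str.isIn m3 loc = true then
    if sd then
      if PySem.Str.isIn "Pomona" loc = true then output ++ " Pomona 1 Scripps 0 CMC 0 Pitzer 0 Mudd 0;"
      else if PySem.Str.isIn "Scipps" loc = true then output ++ " Pomona 0 Scripps 1 CMC 0 Pitzer 0 Mudd 0;"
      else if PySem.Str.isIn "CMC" loc = true then output ++ " Pomona 0 Scripps 0 CMC 1 Pitzer 0 Mudd 0;"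
      else if PySem.Str.isIn "Pitzer" loc = true then output ++ " Pomona 0 Scripps 0 CMC 0 Pitzer 1 Mudd 0;"
      else output ++ " Pomona 0 Scripps 0 CMC 0 Pitzer 0 Mudd 1;"
    else if PySem.Str.isIn "Pomona" loc = true then output ++ " Pomona 1 Scripps 0 CMC 0 Pitzer 0 Mudd 0 \n"
    else if PySem.Str.isIn "Scipps" loc = true then output ++ " Pomona 0 Scripps 1 CMC 0 Pitzer 0 Mudd 0 \n"
    else if PySem.Str.isIn "CMC" loc = true then output ++ " Pomona 0 Scripps 0 CMC 1 Pitzer 0 Mudd 0 \n"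
    else if PySem.Str.isIn "Pitzer" loc = true then output ++ " Pomona 0 Scripps 0 CMC 0 Pitzer 1 Mudd 0 \n"
    else output ++ " Pomona 0 Scripps 0 CMC 0 Pitzer 0 Mudd 1 \n"
  else output

def cellA (locs days : List String) (output : String) (m : String) (k : Int) : String :=
  let dayV := PySem.List.pyGetD days k ""
  if ((dayV = "Saturday" ∨ dayV = "Sunday") ∧ (m = "Breakfast" ∨ m = "Lunch")) ∨
     (dayV ≠ "Saturday" ∧ dayV ≠ "Sunday" ∧ m = "Brunch") then
    output ++ "[" ++ dayV ++ ", " ++ m ++ ", *] Pomona 0 Scripps 0 CMC 0 Pitzer 0 Mudd 0 \n"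
  else
    (PySem.List.pyRange 0 (PySem.List.len locs) 1).foldl
      (fun output j => innerA (PySem.Str.slice dayV (some 0) (some 3)) (PySem.Str.slice m (some 0) (some 3))
        (dayV = "Sunday" ∧ m = "Dinner") output (PySem.List.pyGetD locs j ""))
      (output ++ "[" ++ dayV ++ ", " ++ m ++ ", *]")

def mealsB : List String := ["Breakfast", "Brunch", "Lunch", "Dinner"]

def dayPB (days : List String) : List String :=
  PySem.List.dedup ((PySem.List.pyRange 0 7 1).map
    (fun k => PySem.Str.slice (PySem.List.pyGetD days k "") none (some 3)))

def mealPB : List String := mealsB.map (fun m => PySem.Str.slice m none (some 3))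

def bucketsB (locs days : List String) : PySem.Dict (String × String) (List String) :=
  locs.foldl (fun d loc =>
      (((dayPB days).filter (fun p => PySem.Str.isIn p loc)).flatMap (fun p =>
        (mealPB.filter (fun q => PySem.Str.isIn q loc)).map (fun q => (p, q)))).foldl
        (fun d key => d.modify key [] (fun v => v ++ [loc])) d)
    (((dayPB days).flatMap (fun p => mealPB.map (fun q => (p, q)))).foldl
      (fun d key => d.insert key []) PySem.Dict.empty)

def cellB (locs days : List String) (output : String) (m : String) (k : Int) : String :=
  let d := PySem.List.pyGetD days k ""
  if ((d = "Saturday" ∨ d = "Sunday") ∧ (m = "Breakfast" ∨ m = "Lunch")) ∨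
     (¬ (d = "Saturday" ∨ d = "Sunday") ∧ m = "Brunch") then
    output ++ "[" ++ d ++ ", " ++ m ++ ", *] Pomona 0 Scripps 0 CMC 0 Pitzer 0 Mudd 0 \n"
  else
    let endS : String := if d = "Sunday" ∧ m = "Dinner" then ";" else " \n"
    ((bucketsB locs days).getD (PySem.Str.slice d none (some 3), PySem.Str.slice m none (some 3)) []).foldl
      (fun output loc => output ++ (rowAlt loc ++ endS))
      (output ++ "[" ++ d ++ ", " ++ m ++ ", *]")

theorem A_eq (locs days : List String) :
    arrangePoLocsinTable locs days =
      ((PySem.List.pyRange 0 28 1).map (fun i => (mealChainA i, PySem.Int.mod i 7))).foldl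
        (fun o pr => cellA locs days o pr.1 pr.2) "param postMealLocation := \n" := by
  rw [List.foldl_map]; rfl

theorem B_eq (locs days : List String) :
    arrangePoLocsinTable_alt locs days =
      (mealsB.flatMap (fun m => (PySem.List.pyRange 0 7 1).map (fun k => (m, k)))).foldl
        (fun o pr => cellB locs days o pr.1 pr.2) "param postMealLocation := \n" := by
  rw [foldl_flatMap]
  simp only [List.foldl_map]
  rfl

theorem pairs_eq :
    ((PySem.List.pyRange 0 28 1).map (fun i => (mealChainA i, PySem.Int.mod i 7))) =
      (mealsB.flatMap (fun m => (PySem.List.pyRange 0 7 1).map (fun k => (m, k)))) := by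
  decide

theorem row_eq (loc : String) :
    (if PySem.Str.isIn "Pomona" loc = true then " Pomona 1 Scripps 0 CMC 0 Pitzer 0 Mudd 0"
     else if PySem.Str.isIn "Scipps" loc = true then " Pomona 0 Scripps 1 CMC 0 Pitzer 0 Mudd 0"
     else if PySem.Str.isIn "CMC" loc = true then " Pomona 0 Scripps 0 CMC 1 Pitzer 0 Mudd 0"
     else if PySem.Str.isIn "Pitzer" loc = true then " Pomona 0 Scripps 0 CMC 0 Pitzer 1 Mudd 0"
     else " Pomona 0 Scripps 0 CMC 0 Pitzer 0 Mudd 1") = rowAlt loc := by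
  by_cases h1 : PySem.Str.isIn "Pomona" loc = true
  · simp only [h1, if_true, rowAlt, findHitAlt]; rfl
  · by_cases h2 : PySem.Str.isIn "Scipps" loc = true
    · simp only [h1, h2, if_true, rowAlt, findHitAlt]; rfl
    · by_cases h3 : PySem.Str.isIn "CMC" loc = true
      · simp only [h1, h2, h3, if_true, rowAlt, findHitAlt]; rfl
      · by_cases h4 : PySem.Str.isIn "Pitzer" loc = true
        · simp only [h1, h2, h3, h4, if_true, rowAlt, findHitAlt]; rfl
        · simp only [h1, h2, h3, h4, rowAlt, findHitAlt]; rfl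

theorem innerA_eq (d3 m3 : String) (sd : Prop) [Decidable sd] (o loc : String) :
    innerA d3 m3 sd o loc =
      if PySem.Str.isIn d3 loc = true ∧ PySem.Str.isIn m3 loc = true then
        o ++ (rowAlt loc ++ (if sd then ";" else " \n"))
      else o := by
  unfold innerA
  rw [← row_eq loc]
  split_ifs <;> rfl

theorem cell_eq (locs days : List String) (m : String) (k : Int)
    (hm : m ∈ mealsB) (hk : k ∈ PySem.List.pyRange 0 7 1) (o : String) :
    cellA locs days o m k = cellB locs days o m k := by
  unfold cellA cellB
  have hguard : (((PySem.List.pyGetD days k "" = "Saturday" ∨ PySem.List.pyGetD days k "" = "Sunday") ∧ (m = "Breakfast" ∨ m = "Lunch")) ∨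
      (PySem.List.pyGetD days k "" ≠ "Saturday" ∧ PySem.List.pyGetD days k "" ≠ "Sunday" ∧ m = "Brunch")) ↔
      (((PySem.List.pyGetD days k "" = "Saturday" ∨ PySem.List.pyGetD days k "" = "Sunday") ∧ (m = "Breakfast" ∨ m = "Lunch")) ∨
      (¬ (PySem.List.pyGetD days k "" = "Saturday" ∨ PySem.List.pyGetD days k "" = "Sunday") ∧ m = "Brunch")) := by
    tauto
  rw [if_congr hguard rfl rfl]
  by_cases hg : (((PySem.List.pyGetD days k "" = "Saturday" ∨ PySem.List.pyGetD days k "" = "Sunday") ∧ (m = "Breakfast" ∨ m = "Lunch")) ∨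
      (¬ (PySem.List.pyGetD days k "" = "Saturday" ∨ PySem.List.pyGetD days k "" = "Sunday") ∧ m = "Brunch"))
  · rw [if_pos hg, if_pos hg]
  · rw [if_neg hg, if_neg hg]
    have hslice : ∀ t : String, PySem.Str.slice t (some 0) (some 3) = PySem.Str.slice t none (some 3) := by
      intro t; simp [PySem.Str.slice]
    rw [hslice, hslice]
    rw [PySem.List.foldl_pyRange_zero_pyGetD locs ""
      (innerA (PySem.Str.slice (PySem.List.pyGetD days k "") none (some 3)) (PySem.Str.slice m none (some 3))
        (PySem.List.pyGetD days k "" = "Sunday" ∧ m = "Dinner"))]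
    have hfun : innerA (PySem.Str.slice (PySem.List.pyGetD days k "") none (some 3)) (PySem.Str.slice m none (some 3))
        (PySem.List.pyGetD days k "" = "Sunday" ∧ m = "Dinner") =
        (fun (o loc : String) =>
          if PySem.Str.isIn (PySem.Str.slice (PySem.List.pyGetD days k "") none (some 3)) loc = true ∧
             PySem.Str.isIn (PySem.Str.slice m none (some 3)) loc = true then
            o ++ (rowAlt loc ++ (if PySem.List.pyGetD days k "" = "Sunday" ∧ m = "Dinner" then ";" else " \n"))
          else o) :=
      funext fun o => funext fun loc => innerA_eq _ _ _ o loc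
    rw [hfun, foldl_strAppend_if]
    have hbuck : (bucketsB locs days).getD
        (PySem.Str.slice (PySem.List.pyGetD days k "") none (some 3), PySem.Str.slice m none (some 3)) [] =
        locs.filter (fun l => PySem.Str.isIn (PySem.Str.slice (PySem.List.pyGetD days k "") none (some 3)) l &&
          PySem.Str.isIn (PySem.Str.slice m none (some 3)) l) := by
      unfold bucketsB
      rw [buckets_getD (dayPB days) mealPB locs _ _ _
        (PySem.List.nodup_dedup _) (by decide)
        ((PySem.List.mem_dedup _ _).mpr (List.mem_map.mpr ⟨k, hk, rfl⟩))
        (List.mem_map.mpr ⟨m, hm, rfl⟩)]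
      rw [getD_foldl_insert_nil _ _ (fun c => PySem.Dict.getD_empty _ _), List.nil_append]
    rw [hbuck, foldl_strAppend_map]
    have hfilt : locs.filter (fun x => decide (PySem.Str.isIn (PySem.Str.slice (PySem.List.pyGetD days k "") none (some 3)) x = true ∧
          PySem.Str.isIn (PySem.Str.slice m none (some 3)) x = true)) =
        locs.filter (fun l => PySem.Str.isIn (PySem.Str.slice (PySem.List.pyGetD days k "") none (some 3)) l &&
          PySem.Str.isIn (PySem.Str.slice m none (some 3)) l) :=
      List.filter_congr (fun x _ => by
        cases PySem.Str.isIn (PySem.Str.slice (PySem.List.pyGetD days k "") none (some 3)) x <;>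
        cases PySem.Str.isIn (PySem.Str.slice m none (some 3)) x <;> simp)
    rw [hfilt]

-- ===== VERDICT (by name: the statement is the Claim_ definition above) =====
theorem arrangePoLocsinTable_spec : Claim_equal_arrangePoLocsinTable := by
  intro locs days _hdom _hpre
  unfold Spec_arrangePoLocsinTable
  rw [A_eq, B_eq, pairs_eq]
  refine PySem.List.foldl_congr_mem _ _ _ _ ?_
  intro o pr hpr
  rcases List.mem_flatMap.mp hpr with ⟨m, hm, hpr2⟩
  rcases List.mem_map.mp hpr2 with ⟨k, hk, rfl⟩
  exact cell_eq locs days m k hm hk o
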